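-- pv_equiv track=rewrite | github.com/sitingGZ/bert-sner-cardio | app/modules/fewshot_bronco_semantic_span.py | retrieve_sents_bronco
-- ===== SOURCE A (Python) =====
-- def retrieve_sents_bronco(conll_lines):
--     pairs = []
--     sent = []
--     label = []
--     for l in conll_lines:
--         if len(l) == 3:
--             sent.append(l[0])
--             label.append(l[2])
--         else:
--             assert len(sent) == len(label)
--             pairs.append((sent, label))
--             sent = []
--             label = []
--     return pairs
-- ===== SOURCE B (Python) =====
-- def retrieve_sents_bronco(conll_lines):
--     # Pass 1: split into segments of consecutive length-3 lines, one segment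
--     # per delimiter (a non-length-3 line) plus a trailing segment.
--     segments = [[]]
--     for l in conll_lines:
--         if len(l) == 3:
--             segments[-1].append(l)
--         else:
--             segments.append([])
--     # Drop the trailing segment (A never flushes it), then map each segment
--     # to its (tokens, labels) column pair.
--     return [([l[0] for l in seg], [l[2] for l in seg]) for seg in segments[:-1]]
-- ===== Notes on version B (the rewrite author's own statement) =====
-- stated objective: alternative
-- what changed: Replaces A's single accumulate-and-flush loop over three parallel accumulators by a two-phase decomposition: first split the lines into delimiter-separated segments (dropping the trailing one), then map each segment to its two column projections.
import Mathlib
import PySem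

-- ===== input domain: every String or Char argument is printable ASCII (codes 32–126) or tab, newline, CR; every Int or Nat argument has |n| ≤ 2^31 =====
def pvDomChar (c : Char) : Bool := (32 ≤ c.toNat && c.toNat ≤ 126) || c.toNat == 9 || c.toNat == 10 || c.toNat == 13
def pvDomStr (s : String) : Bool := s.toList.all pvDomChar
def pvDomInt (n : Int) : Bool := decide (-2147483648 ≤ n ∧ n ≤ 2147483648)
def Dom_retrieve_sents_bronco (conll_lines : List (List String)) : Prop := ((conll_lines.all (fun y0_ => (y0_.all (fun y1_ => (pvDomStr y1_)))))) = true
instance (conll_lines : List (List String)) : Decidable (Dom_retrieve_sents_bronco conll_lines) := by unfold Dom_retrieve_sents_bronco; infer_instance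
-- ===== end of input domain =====

-- B restructures A's accumulate-and-flush loop as split-into-segments then map; same cost, proved equal on all inputs.

-- ===== PORT A =====
-- state: (pairs, sent, label), exactly A's three accumulators
def retrieve_sents_bronco (conll_lines : List (List String)) : List (List String × List String) :=
  (conll_lines.foldl
    (fun (st : List (List String × List String) × List String × List String) l =>
      if l.length == 3 then
        (st.1, st.2.1 ++ [PySem.List.pyGetD l 0 ""], st.2.2 ++ [PySem.List.pyGetD l 2 ""])
      else
        (st.1 ++ [(st.2.1, st.2.2)], [], []))
    ([], [], [])).1

-- ===== PORT B =====
-- phase 1 of Source B: segments, kept as (finished segments, current trailing segment)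
def pvSegs (conll_lines : List (List String)) : List (List (List String)) × List (List String) :=
  conll_lines.foldl
    (fun (acc : List (List (List String)) × List (List String)) l =>
      if l.length == 3 then (acc.1, acc.2 ++ [l]) else (acc.1 ++ [acc.2], []))
    ([], [])

-- phase 2 of Source B: each kept segment to its two column projections
def pvCols (seg : List (List String)) : List String × List String :=
  (seg.map (fun l => PySem.List.pyGetD l 0 ""), seg.map (fun l => PySem.List.pyGetD l 2 ""))

def retrieve_sents_bronco_alt (conll_lines : List (List String)) : List (List String × List String) :=
  (pvSegs conll_lines).1.map pvCols

-- ===== PRECONDITION & SPEC =====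
def Spec_retrieve_sents_bronco (conll_lines : List (List String)) (out : List (List String × List String)) : Prop := out = retrieve_sents_bronco_alt conll_lines
instance (conll_lines : List (List String)) (out : List (List String × List String)) : Decidable (Spec_retrieve_sents_bronco conll_lines out) := by unfold Spec_retrieve_sents_bronco; infer_instance

-- ===== CLAIM (what is proved, stated in full; the proofs are below) =====
def Claim_equal_retrieve_sents_bronco : Prop := ∀ (conll_lines : List (List String)), Dom_retrieve_sents_bronco conll_lines → Spec_retrieve_sents_bronco conll_lines (retrieve_sents_bronco conll_lines)

-- ===== LEMMAS AND PROOFS =====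

-- invariant: A's fold state is the image of B's fold state under (map pvCols, pvCols)
theorem pv_inv (xs : List (List String)) :
    ∀ (done : List (List (List String))) (cur : List (List String)),
    (xs.foldl
      (fun (st : List (List String × List String) × List String × List String) l =>
        if l.length == 3 then
          (st.1, st.2.1 ++ [PySem.List.pyGetD l 0 ""], st.2.2 ++ [PySem.List.pyGetD l 2 ""])
        else
          (st.1 ++ [(st.2.1, st.2.2)], [], []))
      (done.map pvCols, (pvCols cur).1, (pvCols cur).2)).1
    =
    (xs.foldl
      (fun (acc : List (List (List String)) × List (List String)) l =>
        if l.length == 3 then (acc.1, acc.2 ++ [l]) else (acc.1 ++ [acc.2], []))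
      (done, cur)).1.map pvCols := by
  induction xs with
  | nil => intro done cur; simp
  | cons l xs ih =>
    intro done cur
    by_cases h : l.length = 3
    · have h1 : (pvCols cur).1 ++ [PySem.List.pyGetD l 0 ""] = (pvCols (cur ++ [l])).1 := by
        simp [pvCols]
      have h2 : (pvCols cur).2 ++ [PySem.List.pyGetD l 2 ""] = (pvCols (cur ++ [l])).2 := by
        simp [pvCols]
      simpa [h, h1, h2] using ih done (cur ++ [l])
    · have := ih (done ++ [cur]) ([] : List (List String))
      simp only [pvCols, List.map_nil, List.map_append, List.map_cons] at this ⊢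
      simpa [h] using this

-- ===== VERDICT (by name: the statement is the Claim_ definition above) =====
theorem retrieve_sents_bronco_spec : Claim_equal_retrieve_sents_bronco := by
  intro conll_lines _
  unfold Spec_retrieve_sents_bronco retrieve_sents_bronco retrieve_sents_bronco_alt pvSegs
  have := pv_inv conll_lines [] []
  simpa [pvCols] using this
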